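-- pv_equiv track=rewrite | github.com/Rilwan-A/GovtExpenditure-to-HealthEquity-Labeller | prompt_engineering/predict.py | parse_yesno_with_rules
-- ===== SOURCE A (Python) =====
-- def parse_yesno_with_rules(li_predictions:list[str])->list[str]:
--     # Parse yes/no from falsetrue
--     for idx in range(len(li_predictions)):
--
--         prediction = li_predictions[idx].lower()
--
--         if 'yes' in prediction:
--             prediction = 'Yes'
--
--         elif 'no' in prediction:
--             prediction = 'No'
--
--         elif any( ( neg_phrase in prediction for neg_phrase in ['not true','false', 'is not', 'not correct', 'does not', 'can not', 'not'])):
--             prediction = 'No'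
--
--         else:
--             prediction = 'NA'
--
--         li_predictions[idx] = prediction
--
--     return li_predictions
-- ===== SOURCE B (Python) =====
-- # Single manual character scan per string (a tiny scanner with flags) instead of
-- # library substring-membership tests; mutates li_predictions in place and returns it.
-- def parse_yesno_with_rules(li_predictions):
--     for idx in range(len(li_predictions)):
--         li_predictions[idx] = _label(li_predictions[idx].lower())
--     return li_predictions
--
-- def _label(p):
--     # one left-to-right pass: return 'Yes' at the first occurrence of 'yes';
--     # remember whether any negative token ('no' or 'false') starts anywhere.
--     neg = False
--     for i in range(len(p)):
--         if p.startswith('yes', i):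
--             return 'Yes'
--         neg = neg or p.startswith('no', i) or p.startswith('false', i)
--     return 'No' if neg else 'NA'
-- ===== Notes on version B (the rewrite author's own statement) =====
-- stated objective: alternative
-- what changed: Replaces the if/elif chain of library substring-membership tests by a hand-written single left-to-right character scan per string that returns 'Yes' at the first occurrence of 'yes' and tracks a negative flag for 'no'/'false' (the seven redundant negative phrases, all containing 'no', collapse into that flag), deciding 'No'/'NA' at the end of the scan.
import Mathlib
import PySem

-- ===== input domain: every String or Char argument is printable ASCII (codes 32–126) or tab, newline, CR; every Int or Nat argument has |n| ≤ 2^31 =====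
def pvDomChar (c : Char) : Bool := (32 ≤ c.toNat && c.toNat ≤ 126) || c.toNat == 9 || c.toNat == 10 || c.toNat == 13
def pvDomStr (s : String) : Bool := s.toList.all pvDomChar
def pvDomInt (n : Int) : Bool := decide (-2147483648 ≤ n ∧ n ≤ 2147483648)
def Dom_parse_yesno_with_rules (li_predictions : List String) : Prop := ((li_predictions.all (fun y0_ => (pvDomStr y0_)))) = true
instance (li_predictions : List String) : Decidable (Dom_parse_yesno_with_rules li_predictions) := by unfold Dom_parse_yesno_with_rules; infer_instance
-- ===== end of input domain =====

-- B replaces A's if/elif chain of substring-membership tests by a single hand-written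
-- character scan per string (objective: alternative, same cost). Both Pythons mutate the
-- input list in place and return it; the equivalence proved here is about the return value.

-- ===== PORT A =====
-- one element of A's loop body: lower, then the if/elif chain
def pvClassifyA (s : String) : String :=
  let prediction := PySem.Str.lower s
  if PySem.Str.isIn "yes" prediction then "Yes"
  else if PySem.Str.isIn "no" prediction then "No"
  else if (["not true", "false", "is not", "not correct", "does not", "can not", "not"].any
            (fun neg_phrase => PySem.Str.isIn neg_phrase prediction)) then "No"
  else "NA"

-- 'for idx in range(len(li)): li[idx] = f(li[idx])' is an element-wise update
def parse_yesno_with_rules (li_predictions : List String) : List String :=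
  li_predictions.map pvClassifyA

-- ===== PORT B =====
-- B's scanner loop: 'for i in range(len(p))' walking positions = recursion on suffixes;
-- p.startswith(tok, i) is tok.isPrefixOf (suffix at i)
def pvScanB : List Char → Bool → String
  | [], neg => if neg then "No" else "NA"
  | c :: rest, neg =>
    if List.isPrefixOf ['y','e','s'] (c :: rest) then "Yes"
    else pvScanB rest (neg || List.isPrefixOf ['n','o'] (c :: rest)
                           || List.isPrefixOf ['f','a','l','s','e'] (c :: rest))

def pvLabelB (s : String) : String := pvScanB (PySem.Chars.lower s.toList) false

def parse_yesno_with_rules_alt (li_predictions : List String) : List String :=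
  li_predictions.map pvLabelB

-- ===== PRECONDITION & SPEC =====
def Spec_parse_yesno_with_rules (li_predictions : List String) (out : List String) : Prop := out = parse_yesno_with_rules_alt li_predictions
instance (li_predictions : List String) (out : List String) : Decidable (Spec_parse_yesno_with_rules li_predictions out) := by unfold Spec_parse_yesno_with_rules; infer_instance

-- ===== CLAIM =====
def Claim_equal_parse_yesno_with_rules : Prop := ∀ (li_predictions : List String), Dom_parse_yesno_with_rules li_predictions → Spec_parse_yesno_with_rules li_predictions (parse_yesno_with_rules li_predictions)

-- ===== LEMMAS AND PROOFS =====

-- 'sub in (c :: rest)' = 'sub starts here, or sub in rest'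
theorem pvIsIn_cons (sub : List Char) (c : Char) (rest : List Char) :
    PySem.Chars.isIn sub (c :: rest)
      = (List.isPrefixOf sub (c :: rest) || PySem.Chars.isIn sub rest) := by
  rw [Bool.eq_iff_iff]
  simp [PySem.Chars.isIn_iff_infix, List.infix_cons_iff, List.isPrefixOf_iff_prefix]

-- B's scan computes exactly the three substring-membership facts A tests
theorem pvScanB_eq (l : List Char) (neg : Bool) :
    pvScanB l neg =
      if PySem.Chars.isIn ['y','e','s'] l then "Yes"
      else if (neg || PySem.Chars.isIn ['n','o'] l || PySem.Chars.isIn ['f','a','l','s','e'] l)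
        then "No" else "NA" := by
  induction l generalizing neg with
  | nil => cases neg <;> decide
  | cons c rest ih =>
    rw [pvScanB, ih, pvIsIn_cons ['y','e','s'], pvIsIn_cons ['n','o'], pvIsIn_cons ['f','a','l','s','e']]
    cases hy : List.isPrefixOf ['y','e','s'] (c :: rest) <;>
    cases hn : List.isPrefixOf ['n','o'] (c :: rest) <;>
    cases hf : List.isPrefixOf ['f','a','l','s','e'] (c :: rest) <;>
    cases neg <;> simp

-- if 'sub' is not in p then no superstring of sub is in p
theorem pvIsIn_false_of_infix (sub ph p : List Char) (h : sub <:+: ph)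
    (hn : PySem.Chars.isIn sub p = false) : PySem.Chars.isIn ph p = false := by
  cases hc : PySem.Chars.isIn ph p with
  | false => rfl
  | true =>
    have hinf : ph <:+: p := (PySem.Chars.isIn_iff_infix ph p).mp hc
    have : PySem.Chars.isIn sub p = true :=
      (PySem.Chars.isIn_iff_infix sub p).mpr (h.trans hinf)
    rw [hn] at this
    exact absurd this (by simp)

theorem pvClassify_eq (s : String) : pvClassifyA s = pvLabelB s := by
  unfold pvClassifyA pvLabelB
  rw [pvScanB_eq]
  by_cases hy : PySem.Chars.isIn ['y','e','s'] (PySem.Chars.lower s.toList) = true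
  · simp [hy]
  · simp only [Bool.not_eq_true] at hy
    by_cases hn : PySem.Chars.isIn ['n','o'] (PySem.Chars.lower s.toList) = true
    · simp [hy, hn]
    · simp only [Bool.not_eq_true] at hn
      have h1 := pvIsIn_false_of_infix ['n','o'] ['n','o','t',' ','t','r','u','e'] _ (by decide) hn
      have h2 := pvIsIn_false_of_infix ['n','o'] ['i','s',' ','n','o','t'] _ (by decide) hn
      have h3 := pvIsIn_false_of_infix ['n','o'] ['n','o','t',' ','c','o','r','r','e','c','t'] _ (by decide) hn
      have h4 := pvIsIn_false_of_infix ['n','o'] ['d','o','e','s',' ','n','o','t'] _ (by decide) hn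
      have h5 := pvIsIn_false_of_infix ['n','o'] ['c','a','n',' ','n','o','t'] _ (by decide) hn
      have h6 := pvIsIn_false_of_infix ['n','o'] ['n','o','t'] _ (by decide) hn
      by_cases hf : PySem.Chars.isIn ['f','a','l','s','e'] (PySem.Chars.lower s.toList) = true
      · simp [hy, hn, hf, h1, h2, h3, h4, h5, h6]
      · simp only [Bool.not_eq_true] at hf
        simp [hy, hn, hf, h1, h2, h3, h4, h5, h6]

-- ===== VERDICT =====
theorem parse_yesno_with_rules_spec : Claim_equal_parse_yesno_with_rules := by
  intro li _
  unfold Spec_parse_yesno_with_rules parse_yesno_with_rules parse_yesno_with_rules_alt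
  simp [pvClassify_eq]
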